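-- pv_equiv track=rewrite | github.com/yagelmai/Db_with_psycopg2 | psycopg2Npython.py | fix_list
-- ===== SOURCE A (Python) =====
-- def fix_list(lst):
--     # create a dictionary to store the counts of each element
--     element_counts = {}
--     fixed_list = []
--     for element in lst:
--         if element in element_counts:
--             element_counts[element] += 1
--             fixed_list.append(element + str(element_counts[element]))
--         else:
--             element_counts[element] = 1
--             fixed_list.append(element)
--     return fixed_list
-- ===== SOURCE B (Python) =====
-- def fix_list(lst):
--     # Group occurrences by element, then scatter labels into a preallocated result.
--     positions = {}
--     for i, x in enumerate(lst):
--         positions.setdefault(x, []).append(i)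
--     result = [None] * len(lst)
--     for x, idxs in positions.items():
--         for k, i in enumerate(idxs):
--             result[i] = x if k == 0 else x + str(k + 1)
--     return result
-- ===== Notes on version B (the rewrite author's own statement) =====
-- stated objective: alternative
-- what changed: Replaces the streaming running-counter loop with a two-stage group-then-scatter: one pass builds a dict from each element to its list of occurrence indices, then a scatter pass writes each occurrence's label into a preallocated result slot by its rank in the group.
import Mathlib
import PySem

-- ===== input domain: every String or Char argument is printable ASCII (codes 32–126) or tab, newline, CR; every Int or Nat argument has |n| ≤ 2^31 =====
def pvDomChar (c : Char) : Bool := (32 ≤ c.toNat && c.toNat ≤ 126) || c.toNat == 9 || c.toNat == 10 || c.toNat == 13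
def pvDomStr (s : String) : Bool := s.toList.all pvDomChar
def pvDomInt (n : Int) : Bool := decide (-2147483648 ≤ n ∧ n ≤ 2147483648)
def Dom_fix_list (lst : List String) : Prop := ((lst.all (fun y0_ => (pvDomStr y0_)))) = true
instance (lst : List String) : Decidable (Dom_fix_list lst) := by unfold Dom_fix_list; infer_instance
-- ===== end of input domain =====

-- B replaces A's streaming running-counter loop with a group-then-scatter pass
-- (dict of occurrence-index lists, then positional writes); objective: alternative.

-- ===== PORT A =====
-- A's for-loop over lst, carrying the counts dict and the accumulated fixed_list.
def fixListLoop : List String → PySem.Dict String Int → List String → List String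
  | [], _, fixed => fixed
  | e :: rest, counts, fixed =>
    if PySem.Dict.contains counts e then
      let c := PySem.Dict.getD counts e 0 + 1
      fixListLoop rest (PySem.Dict.insert counts e c) (fixed ++ [e ++ PySem.Int.toStr c])
    else
      fixListLoop rest (PySem.Dict.insert counts e (1 : Int)) (fixed ++ [e])

def fix_list (lst : List String) : List String :=
  fixListLoop lst PySem.Dict.empty []

-- ===== PORT B =====
-- first pass: positions.setdefault(x, []).append(i)  ==  d[x] = d.get(x, []) + [i]
def buildPositions (lst : List String) : PySem.Dict String (List Int) :=
  (PySem.List.enumerate lst 0).foldl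
    (fun d p => d.modify p.2 [] (fun l => l ++ [p.1])) PySem.Dict.empty

-- scatter pass for one group: for k, i in enumerate(idxs): result[i] = …
-- (indices produced by the first pass are always in range, so Python's
--  result[i] = v never raises and pySetD is exact here)
def scatterGroup (res : List (Option String)) (x : String) (idxs : List Int) : List (Option String) :=
  (PySem.List.enumerate idxs 0).foldl
    (fun r p => PySem.List.pySetD r p.2
      (some (if p.1 == 0 then x else x ++ PySem.Int.toStr (p.1 + 1)))) res

-- result = [None] * len(lst); … ; return result — every slot is written by the
-- scatter pass, so the final .map extracting from the Option placeholders is exact.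
def fix_list_alt (lst : List String) : List String :=
  let positions := buildPositions lst
  let result0 : List (Option String) := List.replicate lst.length none
  let result := positions.items.foldl (fun r q => scatterGroup r q.1 q.2) result0
  result.map (fun o => o.getD "")

-- ===== PRECONDITION & SPEC =====
def Spec_fix_list (lst : List String) (out : List String) : Prop := out = fix_list_alt lst
instance (lst : List String) (out : List String) : Decidable (Spec_fix_list lst out) := by unfold Spec_fix_list; infer_instance

-- ===== CLAIM (what is proved, stated in full; the proofs are below) =====
def Claim_equal_fix_list : Prop := ∀ (lst : List String), Dom_fix_list lst → Spec_fix_list lst (fix_list lst)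

-- ===== LEMMAS AND PROOFS =====

-- The common pointwise description: the label of position i.
def lab (lst : List String) (i : Nat) : String :=
  let x := lst.getD i ""
  let c := (lst.take (i + 1)).count x
  if c = 1 then x else x ++ PySem.Int.toStr (c : Int)

-- The occurrence indices of x in lst, as Python ints.
def occI (lst : List String) (x : String) : List Int :=
  ((List.range lst.length).filter (fun j => lst.getD j "" == x)).map Int.ofNat

-- ---- A-side: fix_list = pointwise labels ----

def bRef : List String → List String → List String
  | _, [] => []
  | pre, e :: rest =>
      (if pre.count e + 1 = 1 then e else e ++ PySem.Int.toStr ((pre.count e : Int) + 1))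
        :: bRef (pre ++ [e]) rest

theorem fixListLoop_eq_bRef (rest : List String) : ∀ (pre : List String)
    (counts : PySem.Dict String Int) (fixed : List String),
    (∀ x, PySem.Dict.get? counts x =
      if pre.count x = 0 then none else some (pre.count x : Int)) →
    fixListLoop rest counts fixed = fixed ++ bRef pre rest := by
  induction rest with
  | nil => intro pre counts fixed _; simp [fixListLoop, bRef]
  | cons e rest ih =>
    intro pre counts fixed h
    have hcont : PySem.Dict.contains counts e = decide (pre.count e ≠ 0) := by
      rw [PySem.Dict.contains_eq_isSome_get?, h e]
      by_cases h0 : pre.count e = 0 <;> simp [h0]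
    have hgetD : PySem.Dict.getD counts e 0 = (pre.count e : Int) := by
      rw [PySem.Dict.getD_eq_get?_getD, h e]
      by_cases h0 : pre.count e = 0 <;> simp [h0]
    have hinv : ∀ (v : Int), v = (pre.count e : Int) + 1 →
        ∀ x, PySem.Dict.get? (PySem.Dict.insert counts e v) x =
          if (pre ++ [e]).count x = 0 then none else some ((pre ++ [e]).count x : Int) := by
      intro v hv x
      rw [PySem.Dict.get?_insert]
      by_cases hx : x = e
      · subst hx
        simp [List.count_append, hv]
      · have hcx : (pre ++ [e]).count x = pre.count x := by
          have : List.count x [e] = 0 := by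
            simp [List.count_singleton]
            exact fun hh => absurd hh.symm hx
          simp [List.count_append, this]
        rw [hcx, if_neg hx, h x]
    by_cases h0 : pre.count e = 0
    · rw [fixListLoop, if_neg (by simp [hcont, h0])]
      rw [ih (pre ++ [e]) _ _ (hinv 1 (by simp [h0]))]
      simp [bRef, h0]
    · rw [fixListLoop, if_pos (by simp [hcont, h0])]
      rw [hgetD]
      rw [ih (pre ++ [e]) _ _ (hinv _ rfl)]
      have hne : pre.count e + 1 ≠ 1 := by omega
      rw [bRef, if_neg hne]
      simp

theorem bRef_eq_labels (rest : List String) : ∀ (pre : List String),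
    bRef pre rest = (List.range rest.length).map (fun j => lab (pre ++ rest) (pre.length + j)) := by
  induction rest with
  | nil => intro pre; simp [bRef]
  | cons e rest ih =>
    intro pre
    rw [bRef, List.length_cons, List.range_succ_eq_map, List.map_cons, List.map_map]
    congr 1
    · -- head
      have hget : (pre ++ e :: rest).getD pre.length "" = e := by
        rw [List.getD, List.getElem?_append_right (le_refl pre.length)]
        simp
      have htake : (pre ++ e :: rest).take (pre.length + 1) = pre ++ [e] := by
        rw [List.take_append]
        simp
      simp only [lab, Nat.add_zero, hget, htake, List.count_append, List.count_singleton]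
      simp
    · -- tail
      have h := ih (pre ++ [e])
      rw [List.append_assoc] at h
      simp only [List.cons_append, List.nil_append] at h
      rw [h]
      apply List.map_congr_left
      intro j _
      simp only [Function.comp, List.length_append, List.length_singleton]
      congr 1
      omega

theorem fix_list_eq_labels (lst : List String) :
    fix_list lst = (List.range lst.length).map (lab lst) := by
  unfold fix_list
  rw [fixListLoop_eq_bRef lst [] PySem.Dict.empty []
      (by intro x; simp [PySem.Dict.get?_empty])]
  rw [List.nil_append, bRef_eq_labels]
  simp

-- ---- occI facts ----

theorem occI_snoc (ys : List String) (e x : String) :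
    occI (ys ++ [e]) x = occI ys x ++ (if e = x then [(ys.length : Int)] else []) := by
  unfold occI
  have hlen : (ys ++ [e]).length = ys.length + 1 := by simp
  rw [hlen, List.range_succ, List.filter_append, List.map_append]
  congr 1
  · congr 1
    apply List.filter_congr
    intro j hj
    rw [List.getD_append ys [e] "" j (List.mem_range.mp hj)]
  · have : (ys ++ [e]).getD ys.length "" = e := by simp [List.getD]
    by_cases hx : e = x
    · simp [hx]
    · simp [hx]

theorem mem_occI {lst : List String} {x : String} {v : Int} (h : v ∈ occI lst x) :
    ∃ m : Nat, v = (m : Int) ∧ m < lst.length ∧ lst.getD m "" = x := by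
  unfold occI at h
  simp only [List.mem_map, List.mem_filter, List.mem_range, beq_iff_eq] at h
  obtain ⟨m, ⟨hm, hx⟩, hv⟩ := h
  exact ⟨m, hv.symm, hm, hx⟩

theorem nodup_occI (lst : List String) (x : String) : (occI lst x).Nodup := by
  unfold occI
  exact ((List.nodup_range).filter _).map (fun a b h => Int.ofNat.inj h)

theorem length_occI (lst : List String) (x : String) :
    (occI lst x).length = lst.count x := by
  induction lst using List.reverseRecOn with
  | nil => simp [occI]
  | append_singleton ys e ih =>
    rw [occI_snoc, List.length_append, ih, List.count_append]
    by_cases hx : e = x <;> simp [hx]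

-- idxOf? helpers
theorem idxOf?_append_left' {α : Type} [BEq α] [LawfulBEq α] {as : List α} (bs : List α)
    {v : α} {k : Nat} (h : as.idxOf? v = some k) : (as ++ bs).idxOf? v = some k := by
  induction as generalizing k with
  | nil => simp [List.idxOf?_nil] at h
  | cons a as ih =>
    rw [List.cons_append, List.idxOf?_cons] at *
    by_cases hav : a == v
    · simpa [hav] using h
    · simp only [hav] at h ⊢
      simp only [Bool.false_eq_true, if_false] at h ⊢
      obtain ⟨k', hk', rfl⟩ := Option.map_eq_some_iff.mp h
      rw [ih hk']
      rfl

theorem idxOf?_append_self {α : Type} [BEq α] [LawfulBEq α] {as : List α} {v : α}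
    (h : v ∉ as) : (as ++ [v]).idxOf? v = some as.length := by
  induction as with
  | nil => simp [List.idxOf?_cons]
  | cons a as ih =>
    have hav : (a == v) = false := by simp; rintro rfl; exact h (List.mem_cons_self)
    rw [List.cons_append, List.idxOf?_cons, if_neg (by simp [hav]),
      ih (fun hm => h (List.mem_cons_of_mem _ hm))]
    rfl

theorem idxOf?_append_of_ne {α : Type} [BEq α] [LawfulBEq α] (as : List α) {v i : α}
    (h : v ≠ i) : (as ++ [i]).idxOf? v = as.idxOf? v := by
  induction as with
  | nil =>
    have : (i == v) = false := by simp; exact fun hh => h hh.symm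
    simp [List.idxOf?_cons, List.idxOf?_nil, this]
  | cons a as ih =>
    rw [List.cons_append, List.idxOf?_cons, List.idxOf?_cons, ih]

theorem idxOf?_occI_of_eq : ∀ (lst : List String) (j : Nat) (x : String),
    j < lst.length → lst.getD j "" = x →
    (occI lst x).idxOf? (j : Int) = some ((lst.take j).count x) := by
  intro lst
  induction lst using List.reverseRecOn with
  | nil => intro j x hj; simp at hj
  | append_singleton ys e ih =>
    intro j x hj hx
    rw [occI_snoc]
    rcases Nat.lt_succ_iff_lt_or_eq.mp (by simpa using hj) with hlt | rfl
    · -- j < ys.length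
      have hx' : ys.getD j "" = x := by
        rw [← hx, List.getD_append ys [e] "" j hlt]
      have hih := ih j x hlt hx'
      have htake : (ys ++ [e]).take j = ys.take j := by
        rw [List.take_append]
        simp [Nat.sub_eq_zero_of_le (Nat.le_of_lt hlt)]
      rw [htake]
      by_cases he : e = x
      · rw [if_pos he]; exact idxOf?_append_left' _ hih
      · rw [if_neg he, List.append_nil]; exact hih
    · -- j = ys.length
      have he : e = x := by
        rw [← hx]; simp [List.getD]
      rw [if_pos he]
      have hnm : ((ys.length : Nat) : Int) ∉ occI ys x := by
        intro hm
        obtain ⟨m, hv, hmlt, _⟩ := mem_occI hm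
        have : (ys.length : Nat) = m := by exact_mod_cast hv
        omega
      rw [idxOf?_append_self hnm, length_occI]
      congr 1
      rw [List.take_append]
      simp

theorem not_mem_occI {lst : List String} {j : Nat} {x : String}
    (h : lst.getD j "" ≠ x) : ((j : Nat) : Int) ∉ occI lst x := by
  intro hm
  obtain ⟨m, hv, _, hx⟩ := mem_occI hm
  have : j = m := by exact_mod_cast hv
  exact h (this ▸ hx)

-- ---- scatter pointwise and group-dict characterisation ----

theorem foldl_pySetD_length (f : Int → Option String) : ∀ (ps : List (Int × Int)) (res : List (Option String)),
    (ps.foldl (fun r p => PySem.List.pySetD r p.2 (f p.1)) res).length = res.length := by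
  intro ps
  induction ps with
  | nil => intro res; rfl
  | cons p ps ih =>
    intro res
    rw [List.foldl_cons, ih, PySem.List.length_pySetD]

theorem scatterGroup_length (res : List (Option String)) (x : String) (idxs : List Int) :
    (scatterGroup res x idxs).length = res.length := by
  unfold scatterGroup
  exact foldl_pySetD_length (fun k => some (if k == 0 then x else x ++ PySem.Int.toStr (k + 1))) _ _

theorem scatterGroup_getElem? (x : String) : ∀ (idxs : List Int) (res : List (Option String)),
    idxs.Nodup → (∀ i ∈ idxs, ∃ m : Nat, i = (m : Int) ∧ m < res.length) →
    ∀ j : Nat, j < res.length →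
    (scatterGroup res x idxs)[j]? =
      match idxs.idxOf? ((j : Nat) : Int) with
      | some k => some (some (if k = 0 then x else x ++ PySem.Int.toStr ((k : Int) + 1)))
      | none => res[j]? := by
  intro idxs
  induction idxs using List.reverseRecOn with
  | nil =>
    intro res _ _ j hj
    simp [scatterGroup, PySem.List.enumerate_nil, List.idxOf?_nil]
  | append_singleton as i ih =>
    intro res hnd hbound j hj
    obtain ⟨m, rfl, hmlt⟩ := hbound i (by simp)
    have hndas : as.Nodup := hnd.of_append_left
    have hinotmem : ((m : Nat) : Int) ∉ as := by
      simp [List.nodup_append] at hnd; tauto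
    have hsnoc : scatterGroup res x (as ++ [((m : Nat) : Int)]) =
        PySem.List.pySetD (scatterGroup res x as) ((m : Nat) : Int)
          (some (if ((0 : Int) + (as.length : Int)) == 0 then x
                 else x ++ PySem.Int.toStr ((0 : Int) + (as.length : Int) + 1))) := by
      unfold scatterGroup
      rw [PySem.List.enumerate_append, List.foldl_append]
      rfl
    rw [hsnoc, PySem.List.pySetD_of_nonneg _ _ (by positivity), Int.toNat_natCast]
    have hlen : (scatterGroup res x as).length = res.length := scatterGroup_length res x as
    by_cases hjm : j = m
    · subst hjm
      rw [List.getElem?_set]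
      rw [if_pos rfl, if_pos (by omega)]
      rw [idxOf?_append_self hinotmem]
      by_cases h0 : as.length = 0 <;>
        simp [h0]
    · rw [List.getElem?_set, if_neg (by omega)]
      rw [idxOf?_append_of_ne as (by exact_mod_cast hjm)]
      exact ih res hndas (fun i hi => hbound i (List.mem_append_left _ hi)) j hj

theorem val_eq_lab (lst : List String) (j : Nat) (hj : j < lst.length) :
    (if (lst.take j).count (lst.getD j "") = 0 then lst.getD j ""
     else lst.getD j "" ++ PySem.Int.toStr (((lst.take j).count (lst.getD j "") : Int) + 1))
    = lab lst j := by
  have htake : lst.take (j + 1) = lst.take j ++ [lst.getD j ""] := by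
    rw [List.take_add_one]
    congr 1
    rw [List.getD, List.getElem?_eq_getElem hj]
    rfl
  simp only [lab, htake, List.count_append, List.count_singleton, beq_self_eq_true,
    if_pos]
  by_cases h0 : (lst.take j).count (lst.getD j "") = 0
  · simp only [h0, if_pos, Nat.zero_add]
  · rw [if_neg h0, if_neg (by omega)]
    congr 2

theorem outer_fold_length : ∀ (L : List (String × List Int)) (res : List (Option String)),
    (L.foldl (fun r q => scatterGroup r q.1 q.2) res).length = res.length := by
  intro L
  induction L with
  | nil => intro res; rfl
  | cons q L ih => intro res; rw [List.foldl_cons, ih, scatterGroup_length]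

theorem outer_fold_getElem? (lst : List String) : ∀ (S : List String), S.Nodup →
    ∀ (res : List (Option String)), res.length = lst.length →
    ∀ j : Nat, j < lst.length →
    ((S.map (fun x => (x, occI lst x))).foldl (fun r q => scatterGroup r q.1 q.2) res)[j]? =
      if lst.getD j "" ∈ S then some (some (lab lst j)) else res[j]? := by
  intro S
  induction S using List.reverseRecOn with
  | nil => intro _ res _ j _; rw [List.map_nil, List.foldl_nil, if_neg (List.not_mem_nil)]
  | append_singleton S x ih =>
    intro hnd res hres j hj
    have hndS : S.Nodup := hnd.of_append_left
    have hxS : x ∉ S := by simp [List.nodup_append] at hnd; tauto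
    rw [List.map_append, List.foldl_append, List.map_singleton, List.foldl_cons,
      List.foldl_nil]
    have hlenS : ((S.map (fun x => (x, occI lst x))).foldl
        (fun r q => scatterGroup r q.1 q.2) res).length = lst.length := by
      rw [outer_fold_length]; exact hres
    have hsg := scatterGroup_getElem? x (occI lst x)
      ((S.map (fun x => (x, occI lst x))).foldl (fun r q => scatterGroup r q.1 q.2) res)
      (nodup_occI lst x)
      (by intro i hi; obtain ⟨m, hv, hm, _⟩ := mem_occI hi; exact ⟨m, hv, by omega⟩)
      j (by omega)
    rw [hsg]
    by_cases hx : lst.getD j "" = x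
    · simp only [idxOf?_occI_of_eq lst j x hj hx]
      rw [if_pos (List.mem_append.mpr (Or.inr (List.mem_singleton.mpr hx)))]
      subst hx
      show _ = some (some (lab lst j))
      rw [← val_eq_lab lst j hj]
    · have hnone : (occI lst x).idxOf? ((j : Nat) : Int) = none :=
        List.idxOf?_eq_none_iff.mpr (not_mem_occI hx)
      simp only [hnone]
      rw [ih hndS res hres j hj]
      by_cases hmem : lst.getD j "" ∈ S
      · rw [if_pos hmem, if_pos (List.mem_append.mpr (Or.inl hmem))]
      · rw [if_neg hmem, if_neg (fun hm => (List.mem_append.mp hm).elim hmem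
          (fun h1 => hx (List.mem_singleton.mp h1)))]

theorem getD_buildPositions : ∀ (lst : List String) (x : String),
    (buildPositions lst).getD x [] = occI lst x := by
  intro lst
  induction lst using List.reverseRecOn with
  | nil => intro x; simp [buildPositions, occI, PySem.List.enumerate_nil, PySem.Dict.getD_empty]
  | append_singleton ys e ih =>
    intro x
    have hsnoc : buildPositions (ys ++ [e]) =
        (buildPositions ys).modify e [] (fun l => l ++ [(0 : Int) + (ys.length : Int)]) := by
      unfold buildPositions
      rw [PySem.List.enumerate_append, List.foldl_append]
      rfl
    rw [hsnoc, occI_snoc, PySem.Dict.modify, PySem.Dict.getD_insert]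
    by_cases hx : x = e
    · rw [if_pos hx, ih e, hx]
      simp
    · rw [if_neg hx, ih x, if_neg (fun h => hx h.symm), List.append_nil]

theorem keys_buildPositions (lst : List String) :
    (buildPositions lst).keys = PySem.Set.ofList lst := by
  unfold buildPositions
  rw [PySem.Dict.keys_foldl_modify_key (PySem.List.enumerate lst 0) (fun p => p.2) []
    (fun d p => fun l => l ++ [p.1]) PySem.Dict.empty]
  rw [PySem.List.map_snd_enumerate]
  simp [PySem.Dict.keys_empty, PySem.Set.update_nil_left]

theorem items_buildPositions (lst : List String) :
    (buildPositions lst).items = (PySem.Set.ofList lst).map (fun x => (x, occI lst x)) := by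
  have hnd : (buildPositions lst).keys.Nodup := by
    rw [keys_buildPositions]; exact PySem.Set.nodup_ofList lst
  rw [PySem.Dict.items_eq_map_keys _ hnd [], keys_buildPositions]
  apply List.map_congr_left
  intro x _
  rw [getD_buildPositions]

theorem fix_list_alt_eq_labels (lst : List String) :
    fix_list_alt lst = (List.range lst.length).map (lab lst) := by
  show (((buildPositions lst).items.foldl (fun r q => scatterGroup r q.1 q.2)
      (List.replicate lst.length none)).map (fun o => o.getD "")) = _
  rw [items_buildPositions]
  have hlen : (((PySem.Set.ofList lst).map (fun x => (x, occI lst x))).foldl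
      (fun r q => scatterGroup r q.1 q.2) (List.replicate lst.length none)).length
      = lst.length := by
    rw [outer_fold_length, List.length_replicate]
  apply List.ext_getElem?
  intro j
  by_cases hj : j < lst.length
  · rw [List.getElem?_map, List.getElem?_map, List.getElem?_range hj]
    rw [outer_fold_getElem? lst (PySem.Set.ofList lst) (PySem.Set.nodup_ofList lst)
      (List.replicate lst.length none) (List.length_replicate) j hj]
    rw [if_pos]
    · rfl
    · rw [PySem.Set.mem_ofList]
      have : lst.getD j "" = lst[j] := List.getD_eq_getElem lst "" hj
      rw [this]
      exact List.getElem_mem hj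
  · rw [List.getElem?_eq_none, List.getElem?_eq_none]
    · simp [Nat.le_of_not_lt hj]
    · rw [List.length_map, hlen]; omega

-- ===== VERDICT (by name: the statement is the Claim_ definition above) =====
theorem fix_list_spec : Claim_equal_fix_list := by
  intro lst _
  unfold Spec_fix_list
  rw [fix_list_eq_labels, fix_list_alt_eq_labels]
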